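-- pv_equiv track=rewrite | github.com/voidf/bertalign | helper.py | filter_duplicated_whitespaces
-- ===== SOURCE A (Python) =====
-- import string
--
-- WHITESPACES = set(string.whitespace.replace('\n', ''))
--
-- def filter_duplicated_whitespaces(src: str) -> str:
--     """去噪：
--         1. 如果换行符跟其它空格字符相连，这些字符替换成换行符
--         2. 连续出现空格字符的，替换成其中一个空格字符"""
--     buf = []
--     newline = 0
--     space = None
--     for i in src:
--         if i == '\n':
--             newline += 1
--         elif i in WHITESPACES:
--             space = i
--         else:
--             if newline:
--                 buf.append('\n' * newline)
--             elif space: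
--                 buf.append(space)
--             newline = 0
--             space = None
--             buf.append(i)
--     if newline:
--         buf.append('\n' * newline)
--     elif space:
--         buf.append(space)
--     return ''.join(buf)
-- ===== SOURCE B (Python) =====
-- import re
--
-- def filter_duplicated_whitespaces(src: str) -> str:
--     """Collapse each maximal whitespace run: to its newline count's worth of
--     newlines if it contains any, else to its last whitespace char."""
--     def repl(m):
--         g = m.group()
--         n = g.count('\n')
--         return '\n' * n if n else g[-1]
--     return re.sub(r'\s+', repl, src, flags=re.ASCII)
-- ===== Notes on version B (the rewrite author's own statement) =====
-- stated objective: idiomatic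
-- what changed: Replaced A's char-by-char state machine (newline counter, pending-space register, flush logic) with a single re.sub over maximal ASCII-whitespace runs whose callback reduces each run to its newline count's worth of newlines or its last character.
import Mathlib
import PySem

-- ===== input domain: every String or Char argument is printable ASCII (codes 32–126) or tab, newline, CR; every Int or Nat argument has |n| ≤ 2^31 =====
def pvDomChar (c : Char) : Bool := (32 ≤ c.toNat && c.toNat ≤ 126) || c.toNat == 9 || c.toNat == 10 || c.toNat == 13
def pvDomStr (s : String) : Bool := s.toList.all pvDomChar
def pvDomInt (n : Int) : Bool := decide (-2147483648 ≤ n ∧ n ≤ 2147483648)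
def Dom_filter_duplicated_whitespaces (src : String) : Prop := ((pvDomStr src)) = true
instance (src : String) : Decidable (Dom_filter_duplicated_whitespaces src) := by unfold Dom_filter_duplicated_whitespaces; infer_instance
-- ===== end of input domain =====

-- B replaces A's char-by-char state machine with a run-at-a-time regex substitution
-- (re.sub over maximal ASCII-whitespace runs); idiomatic, measurably faster by a
-- constant factor (regex scanning vs a Python-level per-character loop).

-- ===== PORT A =====
-- WHITESPACES = set(string.whitespace.replace('\n', ''))
def pvWHITESPACES : List Char := [' ', '\t', '\r', '\x0b', '\x0c']

-- one iteration of A's for-loop; state = (buf, newline, space), buf kept as char chunks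
def fdwStep (st : List (List Char) × Nat × Option Char) (i : Char) :
    List (List Char) × Nat × Option Char :=
  match st with
  | (buf, newline, space) =>
    if i = '\n' then (buf, newline + 1, space)
    else if i ∈ pvWHITESPACES then (buf, newline, some i)
    else
      let buf := if newline ≠ 0 then buf ++ [List.replicate newline '\n']
                 else match space with
                      | some s => buf ++ [[s]]
                      | none => buf
      (buf ++ [[i]], 0, none)

def filter_duplicated_whitespaces (src : String) : String :=
  match src.toList.foldl fdwStep ([], 0, none) with
  | (buf, newline, space) =>
    let buf := if newline ≠ 0 then buf ++ [List.replicate newline '\n']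
               else match space with
                    | some s => buf ++ [[s]]
                    | none => buf
    String.mk buf.flatten   -- ''.join(buf)

-- ===== PORT B =====
-- re.ASCII \s  =  [ \t\n\r\x0b\x0c]
def pvIsWs (c : Char) : Bool :=
  c == ' ' || c == '\t' || c == '\n' || c == '\r' || c == '\x0b' || c == '\x0c'

-- the substitution callback repl(m) on a matched run g
def pvRepl (g : List Char) : List Char :=
  let n := g.count '\n'
  if n ≠ 0 then List.replicate n '\n' else [g.getLastD ' ']

-- re.sub(r'\s+', repl, ·): scan for maximal whitespace runs, replace each
def pvSub : List Char → List Char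
  | [] => []
  | c :: cs =>
    if pvIsWs c then
      pvRepl (c :: cs.takeWhile pvIsWs) ++ pvSub (cs.dropWhile pvIsWs)
    else c :: pvSub cs
termination_by l => l.length
decreasing_by
  all_goals simp only [List.length_cons]
  · exact Nat.lt_succ_of_le (List.length_dropWhile_le pvIsWs cs)
  · omega

def filter_duplicated_whitespaces_alt (src : String) : String :=
  String.mk (pvSub src.toList)

-- ===== PRECONDITION & SPEC =====
def Spec_filter_duplicated_whitespaces (src : String) (out : String) : Prop := out = filter_duplicated_whitespaces_alt src
instance (src : String) (out : String) : Decidable (Spec_filter_duplicated_whitespaces src out) := by unfold Spec_filter_duplicated_whitespaces; infer_instance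

-- ===== CLAIM (what is proved, stated in full; the proofs are below) =====
def Claim_equal_filter_duplicated_whitespaces : Prop := ∀ (src : String), Dom_filter_duplicated_whitespaces src → Spec_filter_duplicated_whitespaces src (filter_duplicated_whitespaces src)

-- ===== LEMMAS AND PROOFS =====

-- pending-whitespace flush, as A performs it before a normal char and at the end
def pvFlush (n : Nat) (s : Option Char) : List (List Char) :=
  if n ≠ 0 then [List.replicate n '\n']
  else match s with
       | some c => [[c]]
       | none => []

-- A's full output (flush included) from the reset state, as chars
def pvAOut (cs : List Char) : List Char :=
  ((cs.foldl fdwStep ([], 0, none)).1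
    ++ pvFlush (cs.foldl fdwStep ([], 0, none)).2.1 (cs.foldl fdwStep ([], 0, none)).2.2).flatten

-- how A's space register evolves over a whitespace-only run
def pvSp (r : List Char) (s : Option Char) : Option Char :=
  r.foldl (fun acc c => if c = '\n' then acc else some c) s

theorem isWs_cases (c : Char) : pvIsWs c = true ↔ (c = '\n' ∨ c ∈ pvWHITESPACES) := by
  simp [pvIsWs, pvWHITESPACES]
  tauto

theorem fdwStep_buf (buf : List (List Char)) (n : Nat) (s : Option Char) (i : Char) :
    fdwStep (buf, n, s) i =
      (buf ++ (fdwStep ([], n, s) i).1, (fdwStep ([], n, s) i).2) := by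
  simp only [fdwStep]
  split_ifs <;> cases s <;> simp

theorem foldl_fdw_buf (cs : List Char) (buf : List (List Char)) (n : Nat) (s : Option Char) :
    cs.foldl fdwStep (buf, n, s) =
      (buf ++ (cs.foldl fdwStep ([], n, s)).1, (cs.foldl fdwStep ([], n, s)).2) := by
  induction cs generalizing buf n s with
  | nil => simp
  | cons c cs ih =>
    simp only [List.foldl_cons]
    rw [fdwStep_buf]
    obtain ⟨b1, n1, s1⟩ := fdwStep ([], n, s) c
    rw [ih (buf ++ b1) n1 s1, ih b1 n1 s1]
    simp

theorem fdwStep_nonws (n : Nat) (s : Option Char) (d : Char)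
    (hdnl : d ≠ '\n') (hd : d ∉ pvWHITESPACES) :
    fdwStep ([], n, s) d = (pvFlush n s ++ [[d]], 0, none) := by
  simp only [fdwStep, pvFlush, if_neg hdnl, if_neg hd]
  split_ifs <;> cases s <;> simp

theorem foldl_ws_run (r : List Char) (hr : ∀ c ∈ r, pvIsWs c = true)
    (buf : List (List Char)) (n : Nat) (s : Option Char) :
    r.foldl fdwStep (buf, n, s) = (buf, n + r.count '\n', pvSp r s) := by
  induction r generalizing n s with
  | nil => simp [pvSp]
  | cons c r ih =>
    have hc := hr c (by simp)
    simp only [List.foldl_cons]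
    rcases (isWs_cases c).mp hc with h | h
    · subst h
      rw [show fdwStep (buf, n, s) '\n' = (buf, n + 1, s) from by simp [fdwStep]]
      rw [ih (fun d hd => hr d (by simp [hd])) (n + 1) s]
      simp [pvSp, List.count_cons] <;> omega
    · have hne : c ≠ '\n' := by
        intro hEq; subst hEq; simp [pvWHITESPACES] at h
      rw [show fdwStep (buf, n, s) c = (buf, n, some c) from by simp [fdwStep, hne, h]]
      rw [ih (fun d hd => hr d (by simp [hd])) n (some c)]
      simp [pvSp, List.count_cons, hne]

-- no newline in an all-whitespace run ⇒ the space register ends at the run's last char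
theorem pvSp_no_nl (r : List Char) : ∀ (s : Option Char), r ≠ [] → '\n' ∉ r →
    pvSp r s = some (r.getLastD ' ') := by
  induction r with
  | nil => simp
  | cons c r ih =>
    intro s _ hnl
    have hc : c ≠ '\n' := by
      intro h; subst h; simp at hnl
    rcases r with _ | ⟨d, r⟩
    · simp [pvSp, hc]
    · have hnl' : '\n' ∉ (d :: r) := fun h => hnl (List.mem_cons_of_mem c h)
      rw [show pvSp (c :: d :: r) s = pvSp (d :: r) (some c) from by
        simp [pvSp, hc]]
      rw [ih (some c) (by simp) hnl']
      simp

-- flushing the state a whitespace-only run produces equals B's replacement of the run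
theorem flush_eq_repl (r : List Char) (hne : r ≠ []) :
    (pvFlush (r.count '\n') (pvSp r none)).flatten = pvRepl r := by
  by_cases h : r.count '\n' = 0
  · rw [pvSp_no_nl r none hne (List.count_eq_zero.mp h)]
    simp [pvFlush, pvRepl, h]
  · simp [pvFlush, pvRepl, h]

theorem fdw_eq_pvAOut (src : String) :
    filter_duplicated_whitespaces src = String.mk (pvAOut src.toList) := by
  unfold filter_duplicated_whitespaces pvAOut
  rcases h : src.toList.foldl fdwStep ([], 0, none) with ⟨buf, n, s⟩
  simp only [pvFlush]
  split_ifs <;> cases s <;> simp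

theorem pvAOut_eq_pvSub (cs : List Char) : pvAOut cs = pvSub cs := by
  induction hL : cs.length using Nat.strong_induction_on generalizing cs with
  | _ L ih =>
  subst hL
  match cs with
  | [] => simp [pvAOut, pvSub, pvFlush]
  | c :: cs =>
    by_cases hc : pvIsWs c = true
    · -- whitespace run: A accumulates state over it, B replaces it wholesale
      set r := c :: cs.takeWhile pvIsWs with hrdef
      set rest := cs.dropWhile pvIsWs with hrest
      have hsplit : c :: cs = r ++ rest := by
        simp [hrdef, hrest, List.takeWhile_append_dropWhile]
      have hrws : ∀ d ∈ r, pvIsWs d = true := by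
        intro d hd
        rcases List.mem_cons.mp hd with h | h
        · subst h; exact hc
        · exact List.mem_takeWhile_imp h
      have hrne : r ≠ [] := by simp [hrdef]
      have hrun := foldl_ws_run r hrws [] 0 none
      simp only [Nat.zero_add] at hrun
      have hApvSub : pvSub (c :: cs) = pvRepl r ++ pvSub rest := by
        rw [pvSub]
        simp [hc, hrdef, hrest]
      have hlen : rest.length < (c :: cs).length := by
        have := List.length_dropWhile_le pvIsWs cs
        rw [← hrest] at this
        simp only [List.length_cons]
        omega
      have hAOut : pvAOut (c :: cs) = pvRepl r ++ pvAOut rest := by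
        unfold pvAOut
        rw [hsplit, List.foldl_append, hrun]
        rcases hrcases : rest with _ | ⟨d, ds⟩
        · simp only [List.foldl_nil, List.nil_append]
          rw [flush_eq_repl r hrne]
          simp [pvAOut, pvFlush]
        · have hdws : pvIsWs d = false := by
            have h0 := List.head_dropWhile_not pvIsWs (l := cs)
            rw [← hrest, hrcases] at h0
            simpa using h0 (by simp)
          have hdnl : d ≠ '\n' := by
            intro h; subst h; simp [pvIsWs] at hdws
          have hdmem : d ∉ pvWHITESPACES := by
            intro hmem
            have : pvIsWs d = true := (isWs_cases d).mpr (Or.inr hmem)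
            simp [hdws] at this
          have hstep := fdwStep_nonws (r.count '\n') (pvSp r none) d hdnl hdmem
          have hstep0 : fdwStep ([], 0, none) d = ([[d]], 0, none) := by
            have := fdwStep_nonws 0 none d hdnl hdmem
            simpa [pvFlush] using this
          rw [List.foldl_cons, hstep, foldl_fdw_buf]
          rw [List.foldl_cons (l := ds), hstep0, foldl_fdw_buf]
          simp [flush_eq_repl r hrne]
          rw [foldl_fdw_buf ds [[d]] 0 none]
          simp
      rw [hAOut, hApvSub, ih rest.length hlen rest rfl]
    · -- ordinary char: both emit it and continue
      have hcnl : c ≠ '\n' := by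
        intro h; subst h; simp [pvIsWs] at hc
      have hcmem : c ∉ pvWHITESPACES := by
        intro hmem
        exact hc ((isWs_cases c).mpr (Or.inr hmem))
      have hstep0 : fdwStep ([], 0, none) c = ([[c]], 0, none) := by
        have := fdwStep_nonws 0 none c hcnl hcmem
        simpa [pvFlush] using this
      have hAOut : pvAOut (c :: cs) = c :: pvAOut cs := by
        simp only [pvAOut, List.foldl_cons, hstep0]
        rw [foldl_fdw_buf]
        simp
      rw [hAOut, ih cs.length (by simp) cs rfl, pvSub]
      simp [hc]

-- ===== VERDICT (by name: the statement is the Claim_ definition above) =====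
theorem filter_duplicated_whitespaces_spec : Claim_equal_filter_duplicated_whitespaces := by
  intro src _
  unfold Spec_filter_duplicated_whitespaces filter_duplicated_whitespaces_alt
  rw [fdw_eq_pvAOut, pvAOut_eq_pvSub]
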